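-- pv_equiv track=rewrite | github.com/slalit360/scalar_practice | DSA_ADV/Bit/strange_equality.py | solve
-- ===== SOURCE A (Python) =====
-- def solve(A):
--     x = 0
--     y = 0
--     tmp = A
--     i = 0
--     while tmp:
--         if tmp & 1 == 0:
--             x += (1 << i)
--         i += 1
--         tmp >>= 1
--
--     y = 1 << i
--     return x ^ y
-- ===== SOURCE B (Python) =====
-- def solve(A):
--     # closed form: flipping the zero-bits of A gives mask - A, xoring with the
--     # next power of two adds it, so the result is (2^(L+1) - 1) - A
--     return (1 << (A.bit_length() + 1)) - 1 - A
-- ===== Notes on version B (the rewrite author's own statement) =====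
-- stated objective: simpler
-- what changed: Replaces the per-bit while loop building x and i with a one-line closed form (1 << (bit_length+1)) - 1 - A.
import Mathlib
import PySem

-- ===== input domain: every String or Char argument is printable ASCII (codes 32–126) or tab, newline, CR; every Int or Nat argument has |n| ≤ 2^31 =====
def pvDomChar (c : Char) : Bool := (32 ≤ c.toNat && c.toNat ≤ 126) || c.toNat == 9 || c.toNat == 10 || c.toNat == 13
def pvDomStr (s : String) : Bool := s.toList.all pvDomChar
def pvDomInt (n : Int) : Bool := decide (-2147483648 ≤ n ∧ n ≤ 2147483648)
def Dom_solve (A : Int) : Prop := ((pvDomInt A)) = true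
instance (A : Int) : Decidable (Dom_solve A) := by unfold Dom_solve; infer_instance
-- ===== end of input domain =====

-- B replaces A's per-bit while loop with the closed form (1 << (bit_length+1)) - 1 - A;
-- equivalence is about the return value on A ≥ 0 (A's loop does not terminate for A < 0).

-- ===== PORT A =====
-- the while loop: state (tmp, x, i); returns the final (x, i)
def solveLoop (tmp x i : Nat) : Nat × Nat :=
  if tmp = 0 then (x, i)
  else solveLoop (tmp / 2) (if tmp % 2 = 0 then x + 2 ^ i else x) (i + 1)
  decreasing_by exact Nat.div_lt_self (Nat.pos_of_ne_zero (by assumption)) (by omega)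

def solve (A : Int) : Int :=
  let p := solveLoop A.toNat 0 0
  -- y = 1 << i; return x ^ y
  Int.ofNat (p.1 ^^^ 2 ^ p.2)

-- ===== PORT B =====
def solve_alt (A : Int) : Int :=
  ((2 : Int) ^ (A.natAbs.size + 1)) - 1 - A

-- ===== PRECONDITION & SPEC =====
-- Pre_ excludes A < 0, on which the Python while loop never terminates (tmp >>= 1 keeps tmp = -1).
def Pre_solve (A : Int) : Prop := 0 ≤ A
instance (A : Int) : Decidable (Pre_solve A) := by unfold Pre_solve; infer_instance

def pvWitness_solve : Int := (5)

def Spec_solve (A : Int) (out : Int) : Prop := out = solve_alt A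
instance (A : Int) (out : Int) : Decidable (Spec_solve A out) := by unfold Spec_solve; infer_instance

-- ===== CLAIM (what is proved, stated in full; the proofs are below) =====
def Claim_equal_solve : Prop := ∀ (A : Int), Dom_solve A → Pre_solve A → Spec_solve A (solve A)

-- ===== LEMMAS AND PROOFS =====

theorem size_succ_div_two (n : Nat) (h : n ≠ 0) : n.size = (n / 2).size + 1 := by
  have hb : Nat.bit (n.testBit 0) (n >>> 1) = n := Nat.bit_testBit_zero_shiftRight_one n
  have := Nat.size_bit (b := n.testBit 0) (n := n >>> 1) (by rw [hb]; exact h)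
  rw [hb] at this
  simpa [Nat.shiftRight_one] using this

theorem xor_two_pow_of_lt : ∀ (L m : Nat), m < 2 ^ L → m ^^^ 2 ^ L = m + 2 ^ L := by
  intro L
  induction L with
  | zero => intro m hm; interval_cases m; decide
  | succ L ih =>
    intro m hm
    have hb : Nat.bit (m.testBit 0) (m >>> 1) = m := Nat.bit_testBit_zero_shiftRight_one m
    have hq : m >>> 1 < 2 ^ L := by
      rw [Nat.shiftRight_one]; omega
    have h2 : (2 : Nat) ^ (L + 1) = Nat.bit false (2 ^ L) := by
      rw [Nat.bit_val, Bool.toNat_false, pow_succ]; omega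
    rw [← hb, h2, Nat.xor_bit, ih _ hq]
    simp only [Bool.bne_false, Nat.bit_val]
    cases m.testBit 0 <;> simp only [Bool.toNat_false, Bool.toNat_true] <;> omega

theorem solveLoop_eq : ∀ (tmp x i : Nat),
    solveLoop tmp x i = (x + 2 ^ i * ((2 ^ tmp.size - 1) - tmp), i + tmp.size) := by
  intro tmp
  induction tmp using Nat.strong_induction_on with
  | _ tmp ih =>
    intro x i
    by_cases h : tmp = 0
    · subst h; simp [solveLoop, Nat.size_zero]
    · rw [solveLoop, if_neg h, ih (tmp / 2) (Nat.div_lt_self (Nat.pos_of_ne_zero h) (by omega))]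
      have hs := size_succ_div_two tmp h
      set q := tmp / 2 with hq
      have hlt : q < 2 ^ q.size := Nat.lt_size_self q
      rw [hs]
      simp only [Prod.mk.injEq]
      refine ⟨?_, by omega⟩
      by_cases hb : tmp % 2 = 0
      · rw [if_pos hb]
        have he : 2 ^ (q.size + 1) - 1 - tmp = 2 * (2 ^ q.size - 1 - q) + 1 := by
          rw [pow_succ]; omega
        rw [he, pow_succ]; ring
      · rw [if_neg hb]
        have he : 2 ^ (q.size + 1) - 1 - tmp = 2 * (2 ^ q.size - 1 - q) := by
          rw [pow_succ]; omega
        rw [he, pow_succ]; ring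

-- ===== VERDICT (by name: the statement is the Claim_ definition above) =====
theorem solve_spec : Claim_equal_solve := by
  intro A _ hpre
  obtain ⟨n, rfl⟩ := Int.eq_ofNat_of_zero_le hpre
  unfold Spec_solve solve solve_alt
  rw [solveLoop_eq]
  simp only [Int.toNat_natCast, Int.natAbs_natCast, Nat.zero_add, pow_zero, one_mul]
  set L := n.size with hL
  have hlt : n < 2 ^ L := Nat.lt_size_self n
  have h2 : (0 : Nat) < 2 ^ L := Nat.two_pow_pos L
  have hm : (2 ^ L - 1) - n < 2 ^ L := by omega
  rw [xor_two_pow_of_lt L _ hm]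
  have hcast : ((2 : Int)) ^ (L + 1) = ((2 ^ L : Nat) : Int) * 2 := by
    push_cast; ring
  rw [hcast]
  simp only [Int.ofNat_eq_natCast]
  omega
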